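-- pv_equiv track=rewrite | github.com/tbtrung39/KHDL_K17A1_LAB | lab10/packages/module6.py | kiem_tra
-- ===== SOURCE A (Python) =====
-- def kiem_tra(s):
--
--     def nhi_phan(s):
--         for char in s:
--             if char not in '01':
--                 return False
--         return True
--
--     def he_8(s):
--         for char in s:
--             if char not in '01234567':
--                 return False
--         return True
--
--     def he_16(s):
--         for char in s:
--             if char not in '0123456789ABCDEF':
--                 return False
--         return True
--
--     if nhi_phan(s):
--         return 2
--     elif he_8(s):
--         return 8
--     elif he_16(s):
--         return 16
--     else:
--         return None
-- ===== SOURCE B (Python) =====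
-- def kiem_tra(s):
--     level = 0
--     for char in s:
--         if char in '01':
--             need = 0
--         elif char in '234567':
--             need = 1
--         elif char in '89ABCDEF':
--             need = 2
--         else:
--             return None
--         if need > level:
--             level = need
--     return (2, 8, 16)[level]
-- ===== Notes on version B (the rewrite author's own statement) =====
-- stated objective: simpler
-- what changed: Replaced A's three separate full scans (binary, then octal, then hex) by a single pass that keeps a running radix level raised per character, returning None on the first invalid character and 2/8/16 indexed by the final level.
import Mathlib
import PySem

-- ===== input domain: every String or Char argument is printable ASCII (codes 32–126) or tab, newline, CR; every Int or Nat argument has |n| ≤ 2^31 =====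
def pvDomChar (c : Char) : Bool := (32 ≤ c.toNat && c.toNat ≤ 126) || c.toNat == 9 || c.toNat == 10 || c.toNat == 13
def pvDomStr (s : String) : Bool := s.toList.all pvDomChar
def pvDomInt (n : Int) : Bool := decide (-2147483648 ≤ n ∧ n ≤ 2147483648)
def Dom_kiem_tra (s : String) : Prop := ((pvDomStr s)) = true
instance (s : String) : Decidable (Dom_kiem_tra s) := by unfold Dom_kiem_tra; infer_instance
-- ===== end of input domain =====

-- ===== PORT A =====
-- B replaces A's three full scans by a single pass with a running radix level (objective: simpler).
def pvNhiPhan : List Char → Bool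
  | [] => true
  | c :: cs => if (['0', '1'].contains c) = false then false else pvNhiPhan cs

def pvHe8 : List Char → Bool
  | [] => true
  | c :: cs => if (['0','1','2','3','4','5','6','7'].contains c) = false then false else pvHe8 cs

def pvHe16 : List Char → Bool
  | [] => true
  | c :: cs => if (['0','1','2','3','4','5','6','7','8','9','A','B','C','D','E','F'].contains c) = false then false else pvHe16 cs

def kiem_tra (s : String) : Option Int :=
  if pvNhiPhan s.toList then some 2
  else if pvHe8 s.toList then some 8
  else if pvHe16 s.toList then some 16
  else none

-- ===== PORT B =====
def pvNeed (c : Char) : Option Nat :=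
  if ['0', '1'].contains c then some 0
  else if ['2','3','4','5','6','7'].contains c then some 1
  else if ['8','9','A','B','C','D','E','F'].contains c then some 2
  else none

def pvBase : Nat → Int
  | 0 => 2
  | 1 => 8
  | _ => 16

def pvGo : List Char → Nat → Option Int
  | [], lvl => some (pvBase lvl)
  | c :: cs, lvl =>
    match pvNeed c with
    | none => none
    | some need => pvGo cs (if need > lvl then need else lvl)

def kiem_tra_alt (s : String) : Option Int := pvGo s.toList 0

-- ===== PRECONDITION & SPEC =====
def Spec_kiem_tra (s : String) (out : Option Int) : Prop := out = kiem_tra_alt s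
instance (s : String) (out : Option Int) : Decidable (Spec_kiem_tra s out) := by unfold Spec_kiem_tra; infer_instance

-- ===== CLAIM (what is proved, stated in full; the proofs are below) =====
def Claim_equal_kiem_tra : Prop := ∀ (s : String), Dom_kiem_tra s → Spec_kiem_tra s (kiem_tra s)

-- ===== LEMMAS AND PROOFS =====
theorem pvStep (k lvl : Nat) : (if k > lvl then k else lvl) = max lvl k := by
  split <;> omega

theorem pvNhi_he8 : ∀ l, pvNhiPhan l = true → pvHe8 l = true
  | [] => by simp [pvNhiPhan, pvHe8]
  | c :: cs => by
    simp only [pvNhiPhan, pvHe8]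
    simp
    intro h h2
    exact ⟨by tauto, pvNhi_he8 cs h2⟩

theorem pvHe8_he16 : ∀ l, pvHe8 l = true → pvHe16 l = true
  | [] => by simp [pvHe8, pvHe16]
  | c :: cs => by
    simp only [pvHe8, pvHe16]
    simp
    intro h h2
    exact ⟨by tauto, pvHe8_he16 cs h2⟩

theorem pvGo_char (l : List Char) (lvl : Nat) :
    pvGo l lvl =
      if pvNhiPhan l then some (pvBase lvl)
      else if pvHe8 l then some (pvBase (max lvl 1))
      else if pvHe16 l then some (pvBase (max lvl 2))
      else none := by
  induction l generalizing lvl with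
  | nil => simp [pvGo, pvNhiPhan]
  | cons c cs ih =>
    by_cases hb : c = '0' ∨ c = '1'
    · rcases hb with rfl | rfl <;>
      · simp only [pvGo, pvNeed, pvNhiPhan, pvHe8, pvHe16, pvStep, ih, Nat.max_zero]
        simp
    · by_cases ho : c = '2' ∨ c = '3' ∨ c = '4' ∨ c = '5' ∨ c = '6' ∨ c = '7'
      · have e1 : max (max lvl 1) 1 = max lvl 1 := by omega
        have e2 : max (max lvl 1) 2 = max lvl 2 := by omega
        rcases ho with rfl | rfl | rfl | rfl | rfl | rfl <;>
        · simp only [pvGo, pvNeed, pvNhiPhan, pvHe8, pvHe16, pvStep, ih, e1, e2]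
          simp
          try (intro h1 h2
               first
                 | exact absurd (pvNhi_he8 _ h1) (by simp [h2])
                 | exact absurd (pvHe8_he16 _ h1) (by simp [h2]))
      · by_cases hh : c = '8' ∨ c = '9' ∨ c = 'A' ∨ c = 'B' ∨ c = 'C' ∨ c = 'D' ∨ c = 'E' ∨ c = 'F'
        · have e1 : max (max lvl 2) 1 = max lvl 2 := by omega
          have e2 : max (max lvl 2) 2 = max lvl 2 := by omega
          rcases hh with rfl | rfl | rfl | rfl | rfl | rfl | rfl | rfl <;>
          · simp only [pvGo, pvNeed, pvNhiPhan, pvHe8, pvHe16, pvStep, ih, e1, e2]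
            simp
            by_cases h1 : pvNhiPhan cs = true
            · simp [h1, pvHe8_he16 _ (pvNhi_he8 _ h1)]
            · by_cases h2 : pvHe8 cs = true
              · simp [h1, h2, pvHe8_he16 _ h2]
              · simp [h1, h2]
        · have hn : pvNeed c = none := by
            simp only [pvNeed, List.contains_eq_mem, List.mem_cons, List.not_mem_nil, or_false,
              decide_eq_true_eq]
            push_neg at hb ho hh
            simp [hb.1, hb.2, ho.1, ho.2.1, ho.2.2.1, ho.2.2.2.1, ho.2.2.2.2.1, ho.2.2.2.2.2,
              hh.1, hh.2.1, hh.2.2.1, hh.2.2.2.1, hh.2.2.2.2.1, hh.2.2.2.2.2.1,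
              hh.2.2.2.2.2.2.1, hh.2.2.2.2.2.2.2]
          have hc8 : (['0','1','2','3','4','5','6','7'].contains c) = false := by
            simp only [List.contains_eq_mem, List.mem_cons, List.not_mem_nil, or_false,
              decide_eq_false_iff_not]
            push_neg at hb ho
            tauto
          have hc16 : (['0','1','2','3','4','5','6','7','8','9','A','B','C','D','E','F'].contains c) = false := by
            simp only [List.contains_eq_mem, List.mem_cons, List.not_mem_nil, or_false,
              decide_eq_false_iff_not]
            push_neg at hb ho hh
            tauto
          have hc2 : (['0','1'].contains c) = false := by
            simp only [List.contains_eq_mem, List.mem_cons, List.not_mem_nil, or_false,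
              decide_eq_false_iff_not]
            push_neg at hb
            tauto
          simp [pvGo, hn, pvNhiPhan, pvHe8, pvHe16, hc2, hc8, hc16, hb, ho, hh]

-- ===== VERDICT (by name: the statement is the Claim_ definition above) =====
theorem kiem_tra_spec : Claim_equal_kiem_tra := by
  intro s _
  unfold Spec_kiem_tra kiem_tra kiem_tra_alt
  rw [pvGo_char]
  rcases h : pvNhiPhan s.toList <;> rcases h8 : pvHe8 s.toList <;> rcases h16 : pvHe16 s.toList <;>
    simp [pvBase]
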